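-- pv_equiv track=rewrite | github.com/981377660LMT/algorithm-study | 22_专题/枚举/枚举分割点-前后缀分解/As Before Bs-删除最少的字符，使得所有A出现在B前.py | solve
-- ===== SOURCE A (Python) =====
-- def solve(s: str):
--     rightA = s.count('A')
--     leftB = 0
--
--     res = rightA
--     for char in s:
--         if char == 'A':
--             rightA -= 1
--         else:
--             leftB += 1
--         res = min(res, leftB + rightA)
--
--     return res
-- ===== SOURCE B (Python) =====
-- def solve(s: str):
--     # Two-state DP: costA = deletions so far to keep prefix all-A,
--     # costB = min deletions for a prefix already in the B region.
--     costA = 0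
--     costB = 0
--     for char in s:
--         newA = costA + (0 if char == 'A' else 1)
--         newB = min(costA, costB) + (1 if char == 'A' else 0)
--         costA = newA
--         costB = newB
--     return min(costA, costB)
-- ===== Notes on version B (the rewrite author's own statement) =====
-- stated objective: alternative
-- what changed: Replaced the precomputed suffix-count plus split-point minimum scan by a two-state dynamic program (cost of an all-A prefix vs cost of a prefix already in the B region) updated in one pass with no precount.
import Mathlib
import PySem

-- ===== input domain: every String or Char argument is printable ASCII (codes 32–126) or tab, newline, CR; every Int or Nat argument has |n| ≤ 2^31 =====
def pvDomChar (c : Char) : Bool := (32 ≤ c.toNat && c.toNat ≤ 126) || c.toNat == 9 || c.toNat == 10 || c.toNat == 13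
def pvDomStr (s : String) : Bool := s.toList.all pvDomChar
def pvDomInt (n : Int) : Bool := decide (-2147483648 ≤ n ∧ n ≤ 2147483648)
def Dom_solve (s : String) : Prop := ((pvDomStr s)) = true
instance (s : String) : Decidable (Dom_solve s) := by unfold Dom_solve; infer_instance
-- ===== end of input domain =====

-- B replaces A's suffix-precount + split-point minimum scan by a two-state DP over the
-- characters (objective: alternative, same linear cost, no precount pass).

-- ===== PORT A =====
def solve (s : String) : Int :=
  let rightA : Int := (PySem.Str.count s "A" : Int)
  let leftB : Int := 0
  let res : Int := rightA
  (s.toList.foldl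
    (fun (st : Int × Int × Int) (char : Char) =>
      if char == 'A' then
        (st.1 - 1, st.2.1, min st.2.2 (st.2.1 + (st.1 - 1)))
      else
        (st.1, st.2.1 + 1, min st.2.2 ((st.2.1 + 1) + st.1)))
    (rightA, leftB, res)).2.2

-- ===== PORT B =====
def solve_alt (s : String) : Int :=
  let st := s.toList.foldl
    (fun (st : Int × Int) (char : Char) =>
      (st.1 + (if char == 'A' then 0 else 1),
       min st.1 st.2 + (if char == 'A' then 1 else 0)))
    (0, 0)
  min st.1 st.2

-- ===== PRECONDITION & SPEC =====
def Spec_solve (s : String) (out : Int) : Prop := out = solve_alt s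
instance (s : String) (out : Int) : Decidable (Spec_solve s out) := by unfold Spec_solve; infer_instance

-- ===== CLAIM (what is proved, stated in full; the proofs are below) =====
def Claim_equal_solve : Prop := ∀ (s : String), Dom_solve s → Spec_solve s (solve s)

-- ===== LEMMAS AND PROOFS =====

-- s.count('A') counts exactly the occurrences of the character 'A'
theorem pv_count_go_singleton (l : List Char) : ∀ (fuel acc : Nat), l.length ≤ fuel →
    PySem.Chars.count.go ['A'] fuel l acc = acc + l.count 'A' := by
  induction l with
  | nil =>
    intro fuel acc _
    cases fuel <;> simp [PySem.Chars.count.go]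
  | cons h t ih =>
    intro fuel acc hf
    cases fuel with
    | zero => simp at hf
    | succ f =>
      simp only [List.length_cons, Nat.succ_le_succ_iff] at hf
      by_cases hA : h = 'A'
      · subst hA
        rw [PySem.Chars.count.go]
        simp only [List.isPrefixOf, BEq.rfl, Bool.true_and,
          if_true, List.length_cons, List.length_nil, List.drop_succ_cons, List.drop_zero]
        rw [ih f (acc + 1) hf]
        simp [List.count_cons_self]
        omega
      · rw [PySem.Chars.count.go]
        have hpre : List.isPrefixOf ['A'] (h :: t) = false := by
          simp only [List.isPrefixOf, Bool.and_true,
            beq_eq_false_iff_ne, ne_eq]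
          exact fun h' => hA h'.symm
        rw [hpre]
        simp only [Bool.false_eq_true, if_false]
        rw [ih f acc hf]
        simp [hA]

theorem pv_strcount_A (s : String) :
    (PySem.Str.count s "A" : Int) = (s.toList.count 'A' : Int) := by
  have : PySem.Str.count s "A" = s.toList.count 'A' := by
    rw [PySem.Str.count_eq]
    show PySem.Chars.count s.toList ['A'] = _
    rw [PySem.Chars.count]
    simp only [List.isEmpty_cons, if_false, Bool.false_eq_true]
    rw [pv_count_go_singleton s.toList s.toList.length 0 le_rfl]
    omega
  exact_mod_cast this

-- the loop invariant: A's running (rightA, leftB, res) vs B's (costA, costB)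
theorem pv_loop_inv (l : List Char) : ∀ (leftB res cA cB : Int),
    leftB = cA → res = min cA cB + (l.count 'A' : Int) →
    (l.foldl
      (fun (st : Int × Int × Int) (char : Char) =>
        if char == 'A' then
          (st.1 - 1, st.2.1, min st.2.2 (st.2.1 + (st.1 - 1)))
        else
          (st.1, st.2.1 + 1, min st.2.2 ((st.2.1 + 1) + st.1)))
      ((l.count 'A' : Int), leftB, res)).2.2
    = min (l.foldl
      (fun (st : Int × Int) (char : Char) =>
        (st.1 + (if char == 'A' then 0 else 1),
         min st.1 st.2 + (if char == 'A' then 1 else 0)))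
      (cA, cB)).1
      (l.foldl
      (fun (st : Int × Int) (char : Char) =>
        (st.1 + (if char == 'A' then 0 else 1),
         min st.1 st.2 + (if char == 'A' then 1 else 0)))
      (cA, cB)).2 := by
  induction l with
  | nil =>
    intro leftB res cA cB h1 h2
    simpa using h2
  | cons c t ih =>
    intro leftB res cA cB h1 h2
    simp only [List.foldl_cons]
    by_cases hc : c = 'A'
    · subst hc
      simp only [BEq.rfl, if_true]
      have hcnt : ((('A' :: t)).count 'A' : Int) = (t.count 'A' : Int) + 1 := by
        simp [List.count_cons_self]
      have hstep : ((('A' :: t).count 'A' : Int) - 1) = (t.count 'A' : Int) := by omega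
      rw [hstep]
      apply ih
      · omega
      · rw [h2, hcnt]
        omega
    · have hbeq : (c == 'A') = false := by simp [hc]
      simp only [hbeq, Bool.false_eq_true, if_false]
      have hstep : ((c :: t).count 'A' : Int) = (t.count 'A' : Int) := by
        simp [hc]
      rw [hstep]
      apply ih
      · omega
      · rw [h2, hstep]
        omega

-- ===== VERDICT (by name: the statement is the Claim_ definition above) =====
theorem solve_spec : Claim_equal_solve := by
  intro s _
  unfold Spec_solve solve solve_alt
  simp only []
  rw [pv_strcount_A]
  apply pv_loop_inv
  · rfl
  · omega
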